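-- pv_equiv track=rewrite | github.com/piotrek0052121/MGtPlaner | server.py | normalize_working_days
-- ===== SOURCE A (Python) =====
-- def normalize_working_days(value):
--     if not isinstance(value, list):
--         return [1, 2, 3, 4, 5]
--     cleaned = []
--     for item in value:
--         try:
--             day = int(item)
--         except (TypeError, ValueError):
--             continue
--         if 0 <= day <= 6 and day not in cleaned:
--             cleaned.append(day)
--     return cleaned or [1, 2, 3, 4, 5]
-- ===== SOURCE B (Python) =====
-- def normalize_working_days(value):
--     if not isinstance(value, list):
--         return [1, 2, 3, 4, 5]
--     n = len(value)
--
--     def first_pos(day):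
--         # index of the first item that converts to this day, or n if none does
--         pos = 0
--         for item in value:
--             try:
--                 hit = int(item) == day
--             except (TypeError, ValueError):
--                 hit = False
--             if hit:
--                 return pos
--             pos += 1
--         return n
--
--     days = [d for d in range(7) if first_pos(d) < n]
--     days.sort(key=first_pos)
--     return days or [1, 2, 3, 4, 5]
-- ===== Notes on version B (the rewrite author's own statement) =====
-- stated objective: alternative
-- what changed: Candidate-driven algorithm: instead of A's single fused loop over the input with an in-accumulator membership dedup, B enumerates the seven possible days 0..6, computes each candidate's first-occurrence position in the input, keeps the candidates that occur, and sorts them by that position; no dedup step exists at all.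
import Mathlib
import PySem

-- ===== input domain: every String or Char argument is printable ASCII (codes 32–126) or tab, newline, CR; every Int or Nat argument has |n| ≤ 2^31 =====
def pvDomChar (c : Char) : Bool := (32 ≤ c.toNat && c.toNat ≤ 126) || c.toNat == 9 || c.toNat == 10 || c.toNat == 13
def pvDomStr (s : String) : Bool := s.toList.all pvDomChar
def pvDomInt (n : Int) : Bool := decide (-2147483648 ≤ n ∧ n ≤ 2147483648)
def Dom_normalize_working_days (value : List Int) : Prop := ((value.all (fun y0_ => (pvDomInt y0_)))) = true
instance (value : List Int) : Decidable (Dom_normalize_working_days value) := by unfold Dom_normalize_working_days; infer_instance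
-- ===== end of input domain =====

-- B replaces A's fused filter+membership-dedup loop by a candidate-driven algorithm
-- (first-occurrence position per day 0..6, then sort by position); same values, no speed claim.

-- ===== PORT A =====
-- A: one fused loop; appends day when in range AND not already collected.
-- (int(item) on an int is the identity; the except branch is unreachable for List Int.)
def normalize_working_days (value : List Int) : List Int :=
  let cleaned := value.foldl (fun cleaned day =>
    if (0 ≤ day && day ≤ 6) && !(cleaned.contains day) then cleaned ++ [day] else cleaned) []
  if cleaned = [] then [1, 2, 3, 4, 5] else cleaned

-- ===== PORT B =====
-- B's first_pos: scan value with a position counter; return the first position whose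
-- item equals day, or n if none does (int(item) on an int is the identity).
def pvFirstPosAux (day : Int) (n : Int) : List Int → Int → Int
  | [], _ => n
  | item :: rest, pos => if item == day then pos else pvFirstPosAux day n rest (pos + 1)

-- B: keep the candidates 0..6 that occur in value, sorted by first-occurrence position.
def normalize_working_days_alt (value : List Int) : List Int :=
  let n : Int := value.length
  let first_pos := fun (day : Int) => pvFirstPosAux day n value 0
  let days := (PySem.List.pyRange 0 7 1).filter (fun d => first_pos d < n)
  let sortedDays := PySem.List.sorted days first_pos false
  if sortedDays = [] then [1, 2, 3, 4, 5] else sortedDays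

-- ===== PRECONDITION & SPEC =====
def Spec_normalize_working_days (value : List Int) (out : List Int) : Prop := out = normalize_working_days_alt value
instance (value : List Int) (out : List Int) : Decidable (Spec_normalize_working_days value out) := by unfold Spec_normalize_working_days; infer_instance

-- ===== CLAIM (what is proved, stated in full; the proofs are below) =====
def Claim_equal_normalize_working_days : Prop := ∀ (value : List Int), Dom_normalize_working_days value → Spec_normalize_working_days value (normalize_working_days value)

-- ===== LEMMAS AND PROOFS =====

-- A's fused step (range check plus 'not in' membership) is a guarded PySem.Set.add.
theorem pv_step (c : PySem.Set Int) (d : Int) :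
    (if (0 ≤ d && d ≤ 6) && !(List.contains c d) then c ++ [d] else c)
      = (if 0 ≤ d && d ≤ 6 then PySem.Set.add c d else c) := by
  by_cases h : (0 ≤ d && d ≤ 6) = true <;>
    by_cases hc : List.contains c d = true <;>
      simp_all [PySem.Set.add]

-- Folding a guarded Set.add over value = folding Set.add over the filtered list.
theorem pv_guarded (value : List Int) (acc : PySem.Set Int) :
    value.foldl (fun c d => if 0 ≤ d && d ≤ 6 then PySem.Set.add c d else c) acc
      = (value.filter (fun d => 0 ≤ d && d ≤ 6)).foldl PySem.Set.add acc := by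
  induction value generalizing acc with
  | nil => rfl
  | cons d rest ih =>
      by_cases h : (0 ≤ d && d ≤ 6) = true <;>
        simp only [List.foldl_cons, List.filter_cons, h, if_pos, if_neg, Bool.false_eq_true,
          not_false_eq_true, ih]

-- first position of d in value (value.length as the 'absent' sentinel)
def pvRank (value : List Int) (d : Int) : Nat :=
  (PySem.List.index? value d).getD value.length

theorem pvFirstPosAux_eq (day n : Int) (value : List Int) :
    ∀ s : Int, pvFirstPosAux day n value s
      = match PySem.List.index? value day with
        | some k => s + (k : Int)
        | none => n := by
  induction value with
  | nil => intro s; rfl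
  | cons item rest ih =>
      intro s
      by_cases h : item = day
      · subst h; rw [PySem.List.index?_cons_self]; simp [pvFirstPosAux]
      · rw [show pvFirstPosAux day n (item :: rest) s = pvFirstPosAux day n rest (s + 1) from
          by simp [pvFirstPosAux, h], PySem.List.index?_cons_of_ne rest h, ih]
        cases PySem.List.index? rest day with
        | none => rfl
        | some k => simp only [Option.map_some]; push_cast; ring

theorem pv_fp_eq_rank (value : List Int) (d : Int) :
    pvFirstPosAux d (value.length : Int) value 0 = (pvRank value d : Int) := by
  rw [pvFirstPosAux_eq]
  unfold pvRank
  cases h : PySem.List.index? value d <;> simp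

theorem pv_fp_lt_iff_mem (value : List Int) (d : Int) :
    (pvFirstPosAux d (value.length : Int) value 0 < (value.length : Int)) ↔ d ∈ value := by
  rw [pvFirstPosAux_eq]
  cases h : PySem.List.index? value d with
  | none => simp [(PySem.List.index?_eq_none_iff value d).mp h]
  | some k =>
      rcases PySem.List.getElem_of_index?_eq_some h with ⟨hk, _, _⟩
      have hm : d ∈ value := (PySem.List.index?_isSome_iff value d).mp (by rw [h]; rfl)
      simp only [hm, iff_true]
      show (0 : Int) + (k : Int) < (value.length : Int)
      omega

-- rank is stable under appending an element on the right, for members of the prefix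
theorem pv_rank_append_of_mem (xs : List Int) (x a : Int) (ha : a ∈ xs) :
    pvRank (xs ++ [x]) a = pvRank xs a := by
  unfold pvRank
  rw [PySem.List.index?_append_of_mem [x] ha]
  rcases Option.isSome_iff_exists.mp ((PySem.List.index?_isSome_iff xs a).mpr ha) with ⟨k, hk⟩
  simp only [PySem.List.index?_eq_idxOf?] at hk
  simp [hk]

theorem pv_rank_lt_length (xs : List Int) (a : Int) (ha : a ∈ xs) :
    pvRank xs a < xs.length := by
  unfold pvRank
  rcases Option.isSome_iff_exists.mp ((PySem.List.index?_isSome_iff xs a).mpr ha) with ⟨k, hk⟩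
  rcases PySem.List.getElem_of_index?_eq_some hk with ⟨hklt, _, _⟩
  simp only [PySem.List.index?_eq_idxOf?] at hk
  simp [hk]
  omega

theorem pv_rank_append_self (xs : List Int) (x : Int) (hx : x ∉ xs) :
    pvRank (xs ++ [x]) x = xs.length := by
  unfold pvRank
  rw [PySem.List.index?_append_singleton_self xs x hx]
  rfl

-- elements of ofList (filter p value) are in value
theorem pv_mem_value (p : Int → Bool) (value : List Int) (a : Int)
    (ha : a ∈ PySem.Set.ofList (value.filter p)) : a ∈ value := by
  have := (PySem.Set.mem_ofList (xs := value.filter p) (y := a)).mp ha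
  exact List.mem_of_mem_filter this

-- the first-occurrence dedup of a filtered list is ordered by first position in value
theorem pv_pairwise (p : Int → Bool) (value : List Int) :
    (PySem.Set.ofList (value.filter p)).Pairwise
      (fun a b => pvRank value a < pvRank value b) := by
  induction value using List.reverseRecOn with
  | nil => simp [PySem.Set.ofList]
  | append_singleton xs x ih =>
      have hsub : ∀ a ∈ PySem.Set.ofList (xs.filter p), a ∈ xs := pv_mem_value p xs
      have hstable : (PySem.Set.ofList (xs.filter p)).Pairwise
          (fun a b => pvRank (xs ++ [x]) a < pvRank (xs ++ [x]) b) := by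
        refine List.Pairwise.imp_of_mem ?_ ih
        intro a b ha hb h
        rw [pv_rank_append_of_mem xs x a (hsub a ha),
            pv_rank_append_of_mem xs x b (hsub b hb)]
        exact h
      rw [List.filter_append]
      by_cases hp : p x = true
      · simp only [List.filter_cons, hp, if_pos, List.filter_nil]
        have : PySem.Set.ofList (xs.filter p ++ [x])
            = PySem.Set.add (PySem.Set.ofList (xs.filter p)) x := by
          simp [PySem.Set.ofList_eq_foldl, List.foldl_append]
        rw [this]
        by_cases hx : x ∈ PySem.Set.ofList (xs.filter p)
        · rwa [PySem.Set.add_of_mem hx]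
        · rw [PySem.Set.add_of_not_mem hx]
          rw [List.pairwise_append]
          refine ⟨hstable, by simp, ?_⟩
          intro a ha b hb
          have hb' : b = x := by simpa using hb
          rw [hb']
          have hax : a ∈ xs := hsub a ha
          have hxnot : x ∉ xs := by
            intro hxs
            exact hx ((PySem.Set.mem_ofList _ _).mpr (List.mem_filter.mpr ⟨hxs, hp⟩))
          rw [pv_rank_append_of_mem xs x a hax, pv_rank_append_self xs x hxnot]
          exact pv_rank_lt_length xs a hax
      · simp only [List.filter_cons, hp, if_neg, List.filter_nil, List.append_nil,
          Bool.false_eq_true, not_false_eq_true]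
        exact hstable

-- same elements: ofList (filter valid value) vs candidates 0..6 present in value
theorem pv_perm (value : List Int) :
    (PySem.Set.ofList (value.filter (fun d => 0 ≤ d && d ≤ 6))).Perm
      ((PySem.List.pyRange 0 7 1).filter
        (fun d => pvFirstPosAux d (value.length : Int) value 0 < (value.length : Int))) := by
  rw [List.perm_ext_iff_of_nodup (PySem.Set.nodup_ofList _)
    (List.Nodup.filter _ (PySem.List.nodup_pyRange_one 0 7))]
  intro a
  simp only [PySem.Set.mem_ofList, List.mem_filter, PySem.List.mem_pyRange_one,
    pv_fp_lt_iff_mem, decide_eq_true_eq, Bool.and_eq_true]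
  constructor
  · rintro ⟨hv, h0, h6⟩
    exact ⟨⟨by simpa using h0, by omega⟩, hv⟩
  · rintro ⟨⟨h0, h7⟩, hv⟩
    exact ⟨hv, by simpa using h0, by simpa using (by omega : a ≤ 6)⟩

-- ===== VERDICT (by name: the statement is the Claim_ definition above) =====
theorem normalize_working_days_spec : Claim_equal_normalize_working_days := by
  intro value _
  unfold Spec_normalize_working_days normalize_working_days normalize_working_days_alt
  simp only [pv_step, pv_guarded, ← PySem.Set.ofList_eq_foldl]
  have hsorted : PySem.List.sorted
      ((PySem.List.pyRange 0 7 1).filter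
        (fun d => pvFirstPosAux d (value.length : Int) value 0 < (value.length : Int)))
      (fun d => pvFirstPosAux d (value.length : Int) value 0) false
      = PySem.Set.ofList (value.filter (fun d => 0 ≤ d && d ≤ 6)) := by
    refine PySem.List.sorted_eq_of_perm_of_pairwise_lt _ _ _ (pv_perm value) ?_
    have := pv_pairwise (fun d => 0 ≤ d && d ≤ 6) value
    refine List.Pairwise.imp_of_mem ?_ this
    intro a b ha hb h
    rw [pv_fp_eq_rank, pv_fp_eq_rank]
    exact_mod_cast h
  rw [hsorted]
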